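-- pv_equiv track=rewrite | github.com/allancrasso2/revisor | Revisor.py | build_context_for_chat
-- ===== SOURCE A (Python) =====
-- from typing import Dict, List, Optional, Tuple
--
-- def build_context_for_chat(sections: Dict[str, str], max_chars: int = 16000) -> str:
--     # Junta seções com rótulos, corta se ficar grande
--     order = ["videoaula","ponto","comecar","siga","exercitar","saibamais","referencias"]
--     parts = []
--     total = 0
--     for k in order:
--         label = {
--             "videoaula":"Texto: Vídeoaula", "ponto":"Ponto de Partida",
--             "comecar":"Vamos Começar", "siga":"Siga em Frente",
--             "exercitar":"Vamos Exercitar", "saibamais":"Saiba Mais",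
--             "referencias":"Referências",
--         }[k]
--         txt = sections.get(k, "") or ""
--         frag = f"\n[{label}]\n{txt}\n"
--         if total + len(frag) > max_chars:
--             frag = frag[: max(0, max_chars - total)]
--         parts.append(frag)
--         total += len(frag)
--         if total >= max_chars:
--             break
--     return "".join(parts).strip()
-- ===== SOURCE B (Python) =====
-- def build_context_for_chat(sections, max_chars=16000):
--     pairs = [
--         ("videoaula", "Texto: V\u00eddeoaula"), ("ponto", "Ponto de Partida"),
--         ("comecar", "Vamos Come\u00e7ar"), ("siga", "Siga em Frente"),
--         ("exercitar", "Vamos Exercitar"), ("saibamais", "Saiba Mais"),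
--         ("referencias", "Refer\u00eancias"),
--     ]
--     full = ""
--     for key, label in pairs:
--         full += "\n[%s]\n%s\n" % (label, sections.get(key) or "")
--     return full[:max(0, max_chars)].strip()
-- ===== Notes on version B (the rewrite author's own statement) =====
-- stated objective: simpler
-- what changed: Drops A's label dict, running total, per-fragment truncation and early break: B folds a fixed (key,label) pair list into the full labeled string and applies one final clamped slice full[:max(0,max_chars)] before stripping.
import Mathlib
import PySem

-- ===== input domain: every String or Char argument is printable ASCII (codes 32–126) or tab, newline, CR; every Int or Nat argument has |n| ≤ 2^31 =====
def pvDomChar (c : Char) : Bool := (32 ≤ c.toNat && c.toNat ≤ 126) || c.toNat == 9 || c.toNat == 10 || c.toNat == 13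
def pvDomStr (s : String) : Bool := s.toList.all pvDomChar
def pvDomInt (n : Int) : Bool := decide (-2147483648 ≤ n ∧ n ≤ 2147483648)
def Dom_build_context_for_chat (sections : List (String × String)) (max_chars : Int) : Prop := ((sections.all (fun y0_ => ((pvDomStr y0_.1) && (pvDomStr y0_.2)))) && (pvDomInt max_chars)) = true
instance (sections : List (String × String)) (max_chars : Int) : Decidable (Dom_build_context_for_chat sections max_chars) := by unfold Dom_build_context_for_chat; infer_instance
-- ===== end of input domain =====

-- B drops A's label dict, running total, per-fragment truncation and early break: it folds a
-- fixed (key,label) pair list into the full string and clamps it with one final slice (simpler).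

-- ===== PORT A =====

-- the fixed section order
def pvOrder : List String :=
  ["videoaula", "ponto", "comecar", "siga", "exercitar", "saibamais", "referencias"]

-- the label dict literal A builds inside the loop
def pvLabels : PySem.Dict String String :=
  PySem.Dict.mk
    [("videoaula", "Texto: Vídeoaula"), ("ponto", "Ponto de Partida"),
     ("comecar", "Vamos Começar"), ("siga", "Siga em Frente"),
     ("exercitar", "Vamos Exercitar"), ("saibamais", "Saiba Mais"),
     ("referencias", "Referências")]

-- the fragment "\n[{label}]\n{txt}\n" for key k (label lookup cannot miss: every k of
-- pvOrder is a key of pvLabels, so get?'s default is never used)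
def pvFrag (sections : List (String × String)) (k : String) : String :=
  let label := (pvLabels.get? k).getD ""
  let t := (PySem.Dict.mk sections).getD k ""
  let txt := if t = "" then "" else t       -- `sections.get(k, "") or ""`
  "\n[" ++ label ++ "]\n" ++ txt ++ "\n"

-- A's loop over `order`: state = (parts, total), with truncation and early break
def pvLoopA (sections : List (String × String)) (max_chars : Int) :
    List String → List String → Int → List String
  | [], parts, _ => parts
  | k :: ks, parts, total =>
      let frag := pvFrag sections k
      let frag := if total + (PySem.Str.len frag : Int) > max_chars
                  then PySem.Str.slice frag none (some (max 0 (max_chars - total)))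
                  else frag
      let parts := parts ++ [frag]
      let total := total + (PySem.Str.len frag : Int)
      if total ≥ max_chars then parts else pvLoopA sections max_chars ks parts total

def build_context_for_chat (sections : List (String × String)) (max_chars : Int) : String :=
  PySem.Str.strip (PySem.Str.join "" (pvLoopA sections max_chars pvOrder [] 0))

-- ===== PORT B =====

-- B's fixed (key, label) pair list
def pvPairs : List (String × String) :=
  [("videoaula", "Texto: Vídeoaula"), ("ponto", "Ponto de Partida"),
   ("comecar", "Vamos Começar"), ("siga", "Siga em Frente"),
   ("exercitar", "Vamos Exercitar"), ("saibamais", "Saiba Mais"),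
   ("referencias", "Referências")]

def build_context_for_chat_alt (sections : List (String × String)) (max_chars : Int) : String :=
  let full := pvPairs.foldl
    (fun acc kl =>
      let g := (PySem.Dict.mk sections).getD kl.1 ""   -- sections.get(key)
      acc ++ "\n[" ++ kl.2 ++ "]\n" ++ (if g = "" then "" else g) ++ "\n") ""
  PySem.Str.strip (PySem.Str.slice full none (some (max 0 max_chars)))

-- ===== PRECONDITION & SPEC =====
def Spec_build_context_for_chat (sections : List (String × String)) (max_chars : Int) (out : String) : Prop := out = build_context_for_chat_alt sections max_chars
instance (sections : List (String × String)) (max_chars : Int) (out : String) : Decidable (Spec_build_context_for_chat sections max_chars out) := by unfold Spec_build_context_for_chat; infer_instance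

-- ===== CLAIM (what is proved, stated in full; the proofs are below) =====
def Claim_equal_build_context_for_chat : Prop := ∀ (sections : List (String × String)) (max_chars : Int), Dom_build_context_for_chat sections max_chars → Spec_build_context_for_chat sections max_chars (build_context_for_chat sections max_chars)

-- ===== LEMMAS AND PROOFS =====

-- ''.join is flatten
theorem pvJoinNil (l : List (List Char)) : PySem.Chars.join [] l = l.flatten := by
  show List.intercalate [] l = l.flatten
  unfold List.intercalate
  induction l with
  | nil => simp
  | cons a l ih => cases l <;> simp_all [List.intersperse]

-- ''.join on strings, list-side
theorem pvJoinStr (l : List String) :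
    (PySem.Str.join "" l).toList = l.flatMap String.toList := by
  simp [PySem.Str.toList_join, pvJoinNil, List.flatMap_def]

theorem pvJoinCons (a : String) (l : List String) :
    (PySem.Str.join "" (a :: l)).toList = a.toList ++ (PySem.Str.join "" l).toList := by
  rw [pvJoinStr, pvJoinStr, List.flatMap_cons]

-- parts is a pure accumulator of pvLoopA
theorem pvLoopA_parts (sections : List (String × String)) (max_chars : Int)
    (ks : List String) (parts : List String) (total : Int) :
    pvLoopA sections max_chars ks parts total =
      parts ++ pvLoopA sections max_chars ks [] total := by
  induction ks generalizing parts total with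
  | nil => simp [pvLoopA]
  | cons k ks ih =>
      simp only [pvLoopA]
      generalize pvFrag sections k = f
      split <;> split
      · rfl
      · rw [ih]; conv_rhs => rw [ih]
        simp only [List.nil_append, List.append_assoc]
      · rfl
      · rw [ih]; conv_rhs => rw [ih]
        simp only [List.nil_append, List.append_assoc]

-- loop invariant: the text the loop still produces is the concatenation of the remaining
-- fragments, cut to the remaining budget max_chars - total
theorem pvLoopA_join (sections : List (String × String)) (max_chars : Int)
    (ks : List String) (total : Int) :
    (PySem.Str.join "" (pvLoopA sections max_chars ks [] total)).toList =
      (((ks.map (pvFrag sections)).map String.toList).flatten).take (max_chars - total).toNat := by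
  induction ks generalizing total with
  | nil => simp [pvLoopA]
  | cons k ks ih =>
      rw [pvLoopA]
      simp only [List.map_cons, List.flatten_cons]
      generalize pvFrag sections k = f
      have hlen : PySem.Str.len f = f.toList.length := by
        simp [PySem.Str.len_eq]
      have hslice : (PySem.Str.slice f none (some (max 0 (max_chars - total)))).toList
          = f.toList.take (max 0 (max_chars - total)).toNat := by
        simp only [PySem.Str.toList_slice, PySem.Chars.slice_eq_listSlice]
        rw [PySem.List.slice_to _ (le_max_left 0 (max_chars - total))]
      have hslen : PySem.Str.len (PySem.Str.slice f none (some (max 0 (max_chars - total))))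
          = min (max 0 (max_chars - total)).toNat f.toList.length := by
        rw [PySem.Str.len_eq, hslice, List.length_take]
      split
      · -- truncation branch: total + len f > max_chars; the break is always taken
        rename_i htr
        rw [hlen] at htr
        split
        · rename_i hbr
          rw [hslen] at hbr
          rw [List.nil_append, pvJoinStr]
          simp only [List.flatMap_cons, List.flatMap_nil, List.append_nil]
          rw [hslice, List.take_append]
          have h1 : (max_chars - total).toNat ≤ f.toList.length := by omega
          rw [Nat.sub_eq_zero_of_le h1, List.take_zero, List.append_nil]
          congr 1
          omega
        · rename_i hbr
          exfalso
          rw [hslen] at hbr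
          have hmx : (max 0 (max_chars - total)).toNat = (max_chars - total).toNat := by omega
          rw [hmx] at hbr
          rw [Nat.min_def] at hbr
          split at hbr <;> omega
      · -- fragment kept whole
        rename_i htr
        rw [hlen] at htr
        split
        · -- break: the budget is hit exactly
          rename_i hbr
          rw [hlen] at hbr
          rw [List.nil_append, pvJoinStr]
          simp only [List.flatMap_cons, List.flatMap_nil, List.append_nil]
          rw [List.take_append]
          have h1 : f.toList.length ≤ (max_chars - total).toNat := by omega
          have h2 : (max_chars - total).toNat - f.toList.length = 0 := by omega
          rw [List.take_of_length_le h1, h2, List.take_zero, List.append_nil]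
        · -- continue with the remaining sections
          rename_i hbr
          rw [pvLoopA_parts, List.nil_append, List.singleton_append, pvJoinCons, ih, List.take_append]
          have h1 : f.toList.length ≤ (max_chars - total).toNat := by
            rw [hlen] at hbr; omega
          rw [List.take_of_length_le h1]
          have h2 : (max_chars - total).toNat - f.toList.length
              = (max_chars - (total + PySem.Str.len f)).toNat := by
            rw [hlen] at hbr ⊢; omega
          rw [h2]

-- B's fold over the literal pair list produces exactly the concatenation of A's fragments
theorem pvFull_eq (sections : List (String × String)) :
    (pvPairs.foldl
      (fun acc kl =>
        let g := (PySem.Dict.mk sections).getD kl.1 ""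
        acc ++ "\n[" ++ kl.2 ++ "]\n" ++ (if g = "" then "" else g) ++ "\n") "").toList =
    ((pvOrder.map (pvFrag sections)).map String.toList).flatten := by
  simp [pvPairs, pvOrder, pvFrag, pvLabels, PySem.Dict.get?, List.foldl]

-- ===== VERDICT (by name: the statement is the Claim_ definition above) =====
theorem build_context_for_chat_spec : Claim_equal_build_context_for_chat := by
  intro sections max_chars _
  unfold Spec_build_context_for_chat build_context_for_chat build_context_for_chat_alt
  apply String.toList_inj.mp
  rw [PySem.Str.toList_strip, PySem.Str.toList_strip]
  congr 1
  rw [pvLoopA_join]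
  simp only [PySem.Str.toList_slice, PySem.Chars.slice_eq_listSlice]
  rw [PySem.List.slice_to _ (le_max_left 0 max_chars), pvFull_eq]
  congr 1
  omega
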